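-- pv_equiv track=rewrite | github.com/tchtinku/Ace_Programming | Strings/AnagramDifference/BruteForce/AnagramDifference.py | min_anagram_diff
-- ===== SOURCE A (Python) =====
-- def min_anagram_diff(str1, str2):
--     # Initialize count for minimum anagram difference
--     minAnagramDiff = 0
--     str2 = list(str2)   # convert str2 to a list for mutability
--
--     for char in str1:
--         found = False
--         for i in range(len(str2)):
--             if str2[i] == char:
--                 str2[i] = '#'  # Mark the character as used
--                 found = True
--                 break
--         if not found:
--             minAnagramDiff += 1   # Increment count if character not found
--
--     return minAnagramDiff
-- ===== SOURCE B (Python) =====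
-- def min_anagram_diff(str1, str2):
--     c1 = {}
--     for ch in str1:
--         c1[ch] = c1.get(ch, 0) + 1
--     c2 = {}
--     for ch in str2:
--         c2[ch] = c2.get(ch, 0) + 1
--     return sum(max(0, n - c2.get(ch, 0)) for ch, n in c1.items())
-- ===== Notes on version B (the rewrite author's own statement) =====
-- stated objective: faster
-- what changed: Replaces the per-character linear scan-and-mark over a mutable copy of str2 by two frequency tables built in one pass each, returning the sum of surplus counts over the distinct characters of str1.
-- intended difference: When str1 contains '#', A's use of '#' as the used-marker lets a '#' of str1 match an already-used position (or leaves it unmatched only before the first successful match), so A undercounts; B returns the true multiset difference, which is the intended value: D_ holds exactly when str2 contains '#' fewer times than str1 does but at least once, or str2 has no '#' and some '#' of str1 comes after a character of str1 that occurs in str2. — e.g. on min_anagram_diff("a#", "a"): A returns 0, B returns 1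
import Mathlib
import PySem

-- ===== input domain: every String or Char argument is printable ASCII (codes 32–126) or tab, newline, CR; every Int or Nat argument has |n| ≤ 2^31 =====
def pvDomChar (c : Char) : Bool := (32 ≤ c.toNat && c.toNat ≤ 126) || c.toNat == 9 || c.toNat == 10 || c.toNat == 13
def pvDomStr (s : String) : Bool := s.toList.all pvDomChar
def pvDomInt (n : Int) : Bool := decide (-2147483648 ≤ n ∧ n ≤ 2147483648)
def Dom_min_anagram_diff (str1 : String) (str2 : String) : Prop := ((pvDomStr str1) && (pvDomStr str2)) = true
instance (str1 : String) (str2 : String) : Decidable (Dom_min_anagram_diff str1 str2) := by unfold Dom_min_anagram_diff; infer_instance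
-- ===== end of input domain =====

-- B replaces A's quadratic scan-and-mark over a mutable copy of str2 by two one-pass
-- frequency tables and a sum of surplus counts over the distinct characters of str1
-- (objective: faster, O(n+m) vs O(n*m)); A's '#' marker can be re-matched by a '#'
-- in str1 — on exactly those inputs (D_ below) B returns the intended multiset count.

-- ===== PORT A =====
-- inner 'for i in range(len(str2)): if str2[i] == char: str2[i] = '#'; break':
-- returns the list with the FIRST occurrence of c replaced by '#', or none if not found
def pvFindMark (s2 : List Char) (c : Char) : Option (List Char) :=
  match s2 with
  | [] => none
  | x :: xs => if x = c then some ('#' :: xs) else (pvFindMark xs c).map (x :: ·)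

-- outer 'for char in str1' with the running counter minAnagramDiff
def pvAnagLoop (l : List Char) (s2 : List Char) (acc : Int) : Int :=
  match l with
  | [] => acc
  | c :: rest =>
    match pvFindMark s2 c with
    | some s2' => pvAnagLoop rest s2' acc
    | none => pvAnagLoop rest s2 (acc + 1)

def min_anagram_diff (str1 : String) (str2 : String) : Int :=
  pvAnagLoop str1.toList str2.toList 0

-- ===== PORT B =====
def min_anagram_diff_alt (str1 : String) (str2 : String) : Int :=
  let c1 := str1.toList.foldl (fun d ch => d.insert ch (d.getD ch 0 + 1)) PySem.Dict.empty
  let c2 := str2.toList.foldl (fun d ch => d.insert ch (d.getD ch 0 + 1)) PySem.Dict.empty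
  (c1.items.map (fun p => max 0 (p.2 - c2.getD p.1 0))).sum

-- ===== PRECONDITION & SPEC =====
-- When str1 contains '#', A's use of '#' as its used-marker lets a '#' of str1 match an
-- already-used position, so A undercounts; B returns the true multiset difference, the
-- intended value. D_ holds exactly when str2 contains '#' fewer times than str1 does but
-- at least once, or str2 has no '#' and some '#' of str1 comes after a character of str1
-- that occurs in str2.
def D_min_anagram_diff (str1 : String) (str2 : String) : Prop :=
  (1 ≤ str2.toList.count '#' ∧ str2.toList.count '#' < str1.toList.count '#') ∨
  (str2.toList.count '#' = 0 ∧
    '#' ∈ (str1.toList.dropWhile (fun c => !str2.toList.contains c)).drop 1)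
instance (str1 : String) (str2 : String) : Decidable (D_min_anagram_diff str1 str2) := by
  unfold D_min_anagram_diff; infer_instance

def Spec_min_anagram_diff (str1 : String) (str2 : String) (out : Int) : Prop :=
  ¬ D_min_anagram_diff str1 str2 → out = min_anagram_diff_alt str1 str2
instance (str1 : String) (str2 : String) (out : Int) : Decidable (Spec_min_anagram_diff str1 str2 out) := by
  unfold Spec_min_anagram_diff; infer_instance

def pvDiffWitness_min_anagram_diff : String × String := ("a#", "a")
def pvDiffWitnessOut_min_anagram_diff : Int × Int := (0, 1)

-- ===== CLAIM (what is proved, stated in full; the proofs are below) =====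
def Claim_unchanged_min_anagram_diff : Prop := ∀ (str1 : String) (str2 : String), Dom_min_anagram_diff str1 str2 → Spec_min_anagram_diff str1 str2 (min_anagram_diff str1 str2)
def Claim_changed_min_anagram_diff : Prop := Dom_min_anagram_diff (pvDiffWitness_min_anagram_diff.1) (pvDiffWitness_min_anagram_diff.2) ∧ D_min_anagram_diff (pvDiffWitness_min_anagram_diff.1) (pvDiffWitness_min_anagram_diff.2) ∧ min_anagram_diff (pvDiffWitness_min_anagram_diff.1) (pvDiffWitness_min_anagram_diff.2) = pvDiffWitnessOut_min_anagram_diff.1 ∧ min_anagram_diff_alt (pvDiffWitness_min_anagram_diff.1) (pvDiffWitness_min_anagram_diff.2) = pvDiffWitnessOut_min_anagram_diff.2 ∧ pvDiffWitnessOut_min_anagram_diff.1 ≠ pvDiffWitnessOut_min_anagram_diff.2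

def Claim_exact_min_anagram_diff : Prop := ∀ (str1 : String) (str2 : String), Dom_min_anagram_diff str1 str2 → D_min_anagram_diff str1 str2 → min_anagram_diff str1 str2 ≠ min_anagram_diff_alt str1 str2

-- ===== LEMMAS AND PROOFS =====

-- abstract count-based replay of A's loop: f is the multiset of the current str2 list
-- (marks included); a found char is removed and a '#' mark added
def pvCntLoop (l : List Char) (f : Char → Nat) (acc : Int) : Int :=
  match l with
  | [] => acc
  | c :: rest =>
    if f c = 0 then pvCntLoop rest f (acc + 1)
    else pvCntLoop rest (fun x => (if x = c then f x - 1 else f x) + (if x = '#' then 1 else 0)) acc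

-- pure greedy multiset matching (no marks)
def pvPureLoop (l : List Char) (g : Char → Nat) (acc : Int) : Int :=
  match l with
  | [] => acc
  | c :: rest =>
    if g c = 0 then pvPureLoop rest g (acc + 1)
    else pvPureLoop rest (fun x => if x = c then g x - 1 else g x) acc

theorem pvFindMark_none (s2 : List Char) (c : Char) :
    pvFindMark s2 c = none ↔ s2.count c = 0 := by
  induction s2 with
  | nil => simp [pvFindMark]
  | cons x xs ih =>
    by_cases h : x = c
    · subst h; simp [pvFindMark, List.count_cons]
    · simp [pvFindMark, h, List.count_cons, Ne.symm h, Option.map_eq_none_iff, ih]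

theorem pvFindMark_some_count (s2 : List Char) (c : Char) (s2' : List Char)
    (h : pvFindMark s2 c = some s2') (x : Char) :
    s2'.count x = (if x = c then s2.count x - 1 else s2.count x) + (if x = '#' then 1 else 0) := by
  induction s2 generalizing s2' with
  | nil => simp [pvFindMark] at h
  | cons y ys ih =>
    by_cases hy : y = c
    · subst hy
      simp [pvFindMark] at h
      subst h
      clear ih
      simp only [List.count_cons, beq_iff_eq]
      by_cases hx : x = y
      · subst hx
        by_cases hxh : x = '#'
        · subst hxh; simp <;> omega
        · simp [hxh, Ne.symm hxh] <;> omega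
      · by_cases hxh : x = '#'
        · subst hxh; simp [hx, Ne.symm hx] <;> omega
        · simp [hx, hxh, Ne.symm hx, Ne.symm hxh] <;> omega
    · simp only [pvFindMark, if_neg hy] at h
      cases hfy : pvFindMark ys c with
      | none => rw [hfy] at h; simp at h
      | some ys' =>
        rw [hfy] at h
        simp only [Option.map_some, Option.some.injEq] at h
        subst h
        have hih := ih ys' hfy
        clear ih
        simp only [List.count_cons, beq_iff_eq, hih]
        by_cases hx : x = y
        · subst hx
          have hxc : ¬ x = c := hy
          by_cases hxh : x = '#'
          · subst hxh; simp [hxc] <;> omega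
          · simp [hxc, hxh, Ne.symm hxh] <;> omega
        · by_cases hxc : x = c
          · subst hxc
            by_cases hxh : x = '#'
            · subst hxh; simp [hx, Ne.symm hx] <;> omega
            · simp [hx, hxh, Ne.symm hx, Ne.symm hxh] <;> omega
          · by_cases hxh : x = '#'
            · subst hxh; simp [hx, hxc, Ne.symm hx] <;> omega
            · simp [hx, hxc, hxh, Ne.symm hx, Ne.symm hxh] <;> omega

theorem pvAnagLoop_abs (l : List Char) (s2 : List Char) (acc : Int) :
    pvAnagLoop l s2 acc = pvCntLoop l (fun c => s2.count c) acc := by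
  induction l generalizing s2 acc with
  | nil => rfl
  | cons c rest ih =>
    cases hf : pvFindMark s2 c with
    | none =>
      have hc : s2.count c = 0 := (pvFindMark_none s2 c).1 hf
      simp only [pvAnagLoop, hf, pvCntLoop, hc, if_pos rfl]
      exact ih s2 (acc + 1)
    | some s2' =>
      have hc : ¬ s2.count c = 0 := fun h0 => by
        rw [(pvFindMark_none s2 c).2 h0] at hf; simp at hf
      have hcnt : (fun x => s2'.count x) =
          (fun x => (if x = c then s2.count x - 1 else s2.count x) + (if x = '#' then 1 else 0)) :=
        funext (pvFindMark_some_count s2 c s2' hf)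
      simp only [pvAnagLoop, hf, pvCntLoop, if_neg hc]
      rw [ih s2' acc, hcnt]

-- when the remaining str1 suffix has no '#', the mark count is irrelevant
theorem pvCntLoop_noHash (l : List Char) (f g : Char → Nat)
    (hl : '#' ∉ l) (hfg : ∀ x, x ≠ '#' → f x = g x) (acc : Int) :
    pvCntLoop l f acc = pvPureLoop l g acc := by
  induction l generalizing f g acc with
  | nil => rfl
  | cons c rest ih =>
    have hc : c ≠ '#' := fun h => hl (h ▸ List.mem_cons_self)
    have hrest : '#' ∉ rest := fun h => hl (List.mem_cons_of_mem _ h)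
    have hfc : f c = g c := hfg c hc
    simp only [pvCntLoop, pvPureLoop, hfc]
    by_cases h0 : g c = 0
    · simp only [h0, if_pos rfl]
      exact ih _ _ hrest hfg _
    · simp only [if_neg h0]
      refine ih _ _ hrest (fun x hx => ?_) _
      by_cases hxc : x = c
      · subst hxc; simp [hx, hfg x hx]
      · simp [hx, hxc, hfg x hx]

-- when str2 holds at least as many '#'s as the remaining str1 suffix, every '#' is found
-- on both sides and the mark surplus is preserved
theorem pvCntLoop_manyHash (l : List Char) (f g : Char → Nat)
    (hle : l.count '#' ≤ g '#') (hgf : g '#' ≤ f '#')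
    (hfg : ∀ x, x ≠ '#' → f x = g x) (acc : Int) :
    pvCntLoop l f acc = pvPureLoop l g acc := by
  induction l generalizing f g acc with
  | nil => rfl
  | cons c rest ih =>
    simp only [pvCntLoop, pvPureLoop]
    by_cases hc : c = '#'
    · subst hc
      have h1 : rest.count '#' + 1 ≤ g '#' := by
        rw [List.count_cons] at hle; simpa using hle
      have hg0 : ¬ g '#' = 0 := by omega
      have hf0 : ¬ f '#' = 0 := by omega
      rw [if_neg hg0, if_neg hf0]
      refine ih _ _ ?_ ?_ ?_ _
      · simpa using (show rest.count '#' ≤ g '#' - 1 by omega)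
      · simpa using (show g '#' - 1 ≤ f '#' - 1 + 1 by omega)
      · intro x hx
        simp [hx, hfg x hx]
    · have hfc : f c = g c := hfg c hc
      have hle' : rest.count '#' ≤ g '#' := by
        rw [List.count_cons] at hle; simpa [hc] using hle
      rw [hfc]
      by_cases h0 : g c = 0
      · rw [if_pos h0, if_pos h0]
        exact ih _ _ hle' hgf hfg _
      · rw [if_neg h0, if_neg h0]
        refine ih _ _ ?_ ?_ ?_ _
        · simpa [Ne.symm hc] using hle'
        · simpa [Ne.symm hc] using (show g '#' ≤ f '#' + 1 by omega)
        · intro x hx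
          by_cases hxc : x = c
          · subst hxc; simp [hx, hfc]
          · simp [hx, hxc, hfg x hx]

-- str2 has no '#': every '#' of str1 precedes the first match, so no mark is ever re-used
theorem pvCntLoop_zeroHash (l : List Char) (l2 : List Char)
    (h2 : l2.count '#' = 0)
    (hD : '#' ∉ (l.dropWhile (fun c => !l2.contains c)).drop 1) (acc : Int) :
    pvCntLoop l (fun c => l2.count c) acc = pvPureLoop l (fun c => l2.count c) acc := by
  induction l generalizing acc with
  | nil => rfl
  | cons c rest ih =>
    simp only [pvCntLoop, pvPureLoop]
    by_cases h0 : l2.count c = 0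
    · rw [if_pos h0, if_pos h0]
      have hmem : c ∉ l2 := List.count_eq_zero.1 h0
      have hD' : '#' ∉ (rest.dropWhile (fun c => !l2.contains c)).drop 1 := by
        rw [List.dropWhile_cons] at hD
        simpa [hmem] using hD
      exact ih hD' (acc + 1)
    · rw [if_neg h0, if_neg h0]
      have hmem : c ∈ l2 := by
        by_contra hcm; exact h0 (List.count_eq_zero.2 hcm)
      have hrest : '#' ∉ rest := by
        rw [List.dropWhile_cons] at hD
        simpa [hmem] using hD
      refine pvCntLoop_noHash rest _ _ hrest (fun x hx => ?_) acc
      simp [hx]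

-- the surplus sum the pure greedy loop computes
theorem pvPureLoop_sum (l : List Char) (g : Char → Nat) (acc : Int) :
    pvPureLoop l g acc = acc + ∑ x ∈ l.toFinset, ((l.count x - g x : Nat) : Int) := by
  induction l generalizing g acc with
  | nil => simp [pvPureLoop]
  | cons c rest ih =>
    -- Σ over (c::rest).toFinset = head term + Σ over rest.toFinset.erase c,
    -- and Σ over rest.toFinset = (rest.count c - h c) + Σ over rest.toFinset.erase c
    have split1 : ∀ (F : Char → Int),
        ∑ x ∈ (c :: rest).toFinset, F x = F c + ∑ x ∈ rest.toFinset.erase c, F x := by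
      intro F
      rw [List.toFinset_cons, ← Finset.add_sum_erase _ F (Finset.mem_insert_self c _),
        Finset.erase_insert_eq_erase]
    have split2 : ∀ (h : Char → Nat),
        ∑ x ∈ rest.toFinset, ((rest.count x - h x : Nat) : Int) =
          ((rest.count c - h c : Nat) : Int) +
            ∑ x ∈ rest.toFinset.erase c, ((rest.count x - h x : Nat) : Int) := by
      intro h
      by_cases hm : c ∈ rest.toFinset
      · exact (Finset.add_sum_erase _ _ hm).symm
      · rw [Finset.erase_eq_of_notMem hm]
        have hc0 : rest.count c = 0 :=
          List.count_eq_zero.2 (fun hc => hm (List.mem_toFinset.2 hc))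
        simp [hc0]
    have hcnt : (c :: rest).count c = rest.count c + 1 := by simp [List.count_cons]
    have hrestterm : ∀ (h : Char → Nat), ∀ x ∈ rest.toFinset.erase c,
        (((c :: rest).count x - h x : Nat) : Int) = ((rest.count x - h x : Nat) : Int) := by
      intro h x hx
      have hxc : x ≠ c := (Finset.mem_erase.1 hx).1
      simp [List.count_cons, Ne.symm hxc]
    simp only [pvPureLoop]
    by_cases h0 : g c = 0
    · rw [if_pos h0, ih, split1 (fun x => (((c :: rest).count x - g x : Nat) : Int)),
        split2 g, Finset.sum_congr rfl (hrestterm g)]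
      have hterm : (((c :: rest).count c - g c : Nat) : Int) =
          1 + ((rest.count c - g c : Nat) : Int) := by
        rw [hcnt, h0]; omega
      rw [hterm]; ring
    · rw [if_neg h0, ih, split1 (fun x => (((c :: rest).count x - g x : Nat) : Int)),
        split2 (fun x => if x = c then g x - 1 else g x),
        Finset.sum_congr rfl (hrestterm g)]
      have hterm : (((c :: rest).count c - g c : Nat) : Int) =
          ((rest.count c - (if c = c then g c - 1 else g c) : Nat) : Int) := by
        rw [hcnt, if_pos rfl]; omega
      rw [hterm]
      have hsum : ∑ x ∈ rest.toFinset.erase c,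
            ((rest.count x - (if x = c then g x - 1 else g x) : Nat) : Int) =
          ∑ x ∈ rest.toFinset.erase c, ((rest.count x - g x : Nat) : Int) :=
        Finset.sum_congr rfl (fun x hx => by simp [(Finset.mem_erase.1 hx).1])
      rw [hsum]

-- B's dict sum is the same surplus sum
theorem pvAlt_sum (str1 str2 : String) :
    min_anagram_diff_alt str1 str2 =
      ∑ x ∈ str1.toList.toFinset,
        ((str1.toList.count x - str2.toList.count x : Nat) : Int) := by
  show ((PySem.Dict.counter str1.toList).items.map
      (fun p => max 0 (p.2 - (PySem.Dict.counter str2.toList).getD p.1 0))).sum = _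
  rw [PySem.Dict.items_counter]
  simp only [List.map_map]
  have hterm : ∀ x, (max 0 ((str1.toList.count x : Int) -
      (PySem.Dict.counter str2.toList).getD x 0)) =
      ((str1.toList.count x - str2.toList.count x : Nat) : Int) := by
    intro x
    rw [PySem.Dict.getD_counter]
    omega
  have hnd : (PySem.Set.ofList str1.toList).Nodup := PySem.Set.nodup_ofList _
  have hfin : (PySem.Set.ofList str1.toList).toFinset = str1.toList.toFinset := by
    ext x
    simp [List.mem_toFinset, PySem.Set.mem_ofList]
  calc ((PySem.Set.ofList str1.toList).map fun x =>
          max 0 ((str1.toList.count x : Int) - (PySem.Dict.counter str2.toList).getD x 0)).sum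
      = ∑ x ∈ (PySem.Set.ofList str1.toList).toFinset,
          max 0 ((str1.toList.count x : Int) - (PySem.Dict.counter str2.toList).getD x 0) := by
        rw [List.sum_toFinset _ hnd]
    _ = ∑ x ∈ str1.toList.toFinset,
          ((str1.toList.count x - str2.toList.count x : Nat) : Int) := by
        rw [hfin]; exact Finset.sum_congr rfl (fun x _ => hterm x)


-- accumulator shift law
theorem pvPureLoop_shift (l : List Char) (g : Char → Nat) (acc : Int) :
    pvPureLoop l g (acc + 1) = pvPureLoop l g acc + 1 := by
  induction l generalizing g acc with
  | nil => rfl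
  | cons c rest ih =>
    simp only [pvPureLoop]
    by_cases h0 : g c = 0
    · rw [if_pos h0, if_pos h0]; exact ih _ (acc + 1)
    · rw [if_neg h0, if_neg h0]; exact ih _ acc

-- A's marked loop never misses more often than the pure greedy loop
theorem pvCntLoop_le (l : List Char) (f g : Char → Nat)
    (hfg : ∀ x, x ≠ '#' → f x = g x) (hgf : g '#' ≤ f '#') (acc : Int) :
    pvCntLoop l f acc ≤ pvPureLoop l g acc := by
  induction l generalizing f g acc with
  | nil => exact le_refl _
  | cons c rest ih =>
    simp only [pvCntLoop, pvPureLoop]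
    by_cases hc : c = '#'
    · subst hc
      by_cases hg0 : g '#' = 0
      · rw [if_pos hg0]
        by_cases hf0 : f '#' = 0
        · rw [if_pos hf0]; exact ih _ _ hfg hgf (acc + 1)
        · rw [if_neg hf0]
          calc pvCntLoop rest (fun x => (if x = '#' then f x - 1 else f x) +
                  (if x = '#' then 1 else 0)) acc
              ≤ pvPureLoop rest g acc := by
                refine ih _ _ (fun x hx => by simp [hx, hfg x hx]) ?_ acc
                simpa using (show g '#' ≤ f '#' - 1 + 1 by omega)
            _ ≤ pvPureLoop rest g (acc + 1) := by rw [pvPureLoop_shift]; omega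
      · rw [if_neg hg0]
        have hf0 : ¬ f '#' = 0 := by omega
        rw [if_neg hf0]
        refine ih _ _ (fun x hx => by simp [hx, hfg x hx]) ?_ acc
        simpa using (show g '#' - 1 ≤ f '#' - 1 + 1 by omega)
    · have hfc : f c = g c := hfg c hc
      rw [hfc]
      by_cases h0 : g c = 0
      · rw [if_pos h0, if_pos h0]; exact ih _ _ hfg hgf (acc + 1)
      · rw [if_neg h0, if_neg h0]
        refine ih _ _ (fun x hx => ?_) ?_ acc
        · by_cases hxc : x = c
          · subst hxc; simp [hx, hfc]
          · simp [hx, hxc, hfg x hx]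
        · simpa [Ne.symm hc] using (show g '#' ≤ f '#' + 1 by omega)

-- strict: once A holds a mark (or an unmatched real '#') and the pure loop will run out
theorem pvCntLoop_lt (l : List Char) (f g : Char → Nat)
    (hfg : ∀ x, x ≠ '#' → f x = g x) (hf1 : 1 ≤ f '#')
    (hlt : g '#' < l.count '#') (acc : Int) :
    pvCntLoop l f acc < pvPureLoop l g acc := by
  induction l generalizing f g acc with
  | nil => simp at hlt
  | cons c rest ih =>
    simp only [pvCntLoop, pvPureLoop]
    by_cases hc : c = '#'
    · subst hc
      have hf0 : ¬ f '#' = 0 := by omega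
      rw [if_neg hf0]
      by_cases hg0 : g '#' = 0
      · rw [if_pos hg0]
        calc pvCntLoop rest (fun x => (if x = '#' then f x - 1 else f x) +
                (if x = '#' then 1 else 0)) acc
            ≤ pvPureLoop rest g acc := by
              refine pvCntLoop_le rest _ _ (fun x hx => by simp [hx, hfg x hx]) ?_ acc
              simpa using (show g '#' ≤ f '#' - 1 + 1 by omega)
          _ < pvPureLoop rest g (acc + 1) := by rw [pvPureLoop_shift]; omega
      · rw [if_neg hg0]
        refine ih _ _ (fun x hx => by simp [hx, hfg x hx]) ?_ ?_ acc
        · simpa using (show 1 ≤ f '#' - 1 + 1 by omega)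
        · have : (List.count '#' ('#' :: rest)) = rest.count '#' + 1 := by
            simp [List.count_cons]
          simp only [this] at hlt
          simpa using (show g '#' - 1 < rest.count '#' by omega)
    · have hfc : f c = g c := hfg c hc
      have hcnt : (c :: rest).count '#' = rest.count '#' := by
        simp [List.count_cons, hc]
      rw [hcnt] at hlt
      rw [hfc]
      by_cases h0 : g c = 0
      · rw [if_pos h0, if_pos h0]; exact ih _ _ hfg hf1 hlt (acc + 1)
      · rw [if_neg h0, if_neg h0]
        refine ih _ _ (fun x hx => ?_) ?_ ?_ acc
        · by_cases hxc : x = c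
          · subst hxc; simp [hx, hfc]
          · simp [hx, hxc, hfg x hx]
        · simpa [Ne.symm hc] using (show 1 ≤ f '#' + 1 by omega)
        · simpa [Ne.symm hc] using hlt

-- strict, str2 with no '#': some '#' of str1 lies after the first match
theorem pvCntLoop_lt_zeroHash (l : List Char) (l2 : List Char)
    (h2 : l2.count '#' = 0)
    (hD : '#' ∈ (l.dropWhile (fun c => !l2.contains c)).drop 1) (acc : Int) :
    pvCntLoop l (fun c => l2.count c) acc < pvPureLoop l (fun c => l2.count c) acc := by
  induction l generalizing acc with
  | nil => simp at hD
  | cons c rest ih =>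
    simp only [pvCntLoop, pvPureLoop]
    by_cases h0 : l2.count c = 0
    · rw [if_pos h0, if_pos h0]
      have hmem : c ∉ l2 := List.count_eq_zero.1 h0
      have hD' : '#' ∈ (rest.dropWhile (fun c => !l2.contains c)).drop 1 := by
        rw [List.dropWhile_cons] at hD
        simpa [hmem] using hD
      exact ih hD' (acc + 1)
    · rw [if_neg h0, if_neg h0]
      have hmem : c ∈ l2 := by
        by_contra hcm; exact h0 (List.count_eq_zero.2 hcm)
      have hrest : '#' ∈ rest := by
        rw [List.dropWhile_cons] at hD
        simpa [hmem] using hD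
      have hc : c ≠ '#' := by
        intro h; rw [h] at hmem
        exact absurd h2 (List.count_pos_iff.2 hmem).ne'
      refine pvCntLoop_lt rest _ _ (fun x hx => by simp [hx]) ?_ ?_ acc
      · simpa [Ne.symm hc] using (show 1 ≤ l2.count '#' + 1 by omega)
      · have h1 : 1 ≤ rest.count '#' := List.count_pos_iff.2 hrest
        simpa [Ne.symm hc, h2] using h1

-- ===== VERDICT (by name: the statement is the Claim_ definition above) =====
theorem min_anagram_diff_spec : Claim_unchanged_min_anagram_diff := by
  intro str1 str2 _ hnD
  unfold min_anagram_diff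
  rw [pvAnagLoop_abs, pvAlt_sum]
  have hpure : pvPureLoop str1.toList (fun c => str2.toList.count c) 0 =
      ∑ x ∈ str1.toList.toFinset,
        ((str1.toList.count x - str2.toList.count x : Nat) : Int) := by
    rw [pvPureLoop_sum]; ring
  rw [← hpure]
  by_cases h2 : str2.toList.count '#' = 0
  · refine pvCntLoop_zeroHash _ _ h2 ?_ 0
    intro hmem
    exact hnD (Or.inr ⟨h2, hmem⟩)
  · refine pvCntLoop_manyHash _ _ _ ?_ le_rfl (fun _ _ => rfl) 0
    by_contra hgt
    exact hnD (Or.inl ⟨by omega, by omega⟩)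

theorem min_anagram_diff_changed : Claim_changed_min_anagram_diff := by
  unfold Claim_changed_min_anagram_diff; decide

theorem min_anagram_diff_tight : Claim_exact_min_anagram_diff := by
  intro str1 str2 _ hD
  unfold min_anagram_diff
  rw [pvAnagLoop_abs, pvAlt_sum]
  have hpure : pvPureLoop str1.toList (fun c => str2.toList.count c) 0 =
      ∑ x ∈ str1.toList.toFinset,
        ((str1.toList.count x - str2.toList.count x : Nat) : Int) := by
    rw [pvPureLoop_sum]; ring
  rw [← hpure]
  apply ne_of_lt
  rcases hD with ⟨h1, h2⟩ | ⟨h2, hmem⟩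
  · exact pvCntLoop_lt _ _ _ (fun _ _ => rfl) h1 h2 0
  · exact pvCntLoop_lt_zeroHash _ _ h2 hmem 0
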